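-- pv_equiv track=rewrite | github.com/scrapy/scrapy | .scrapy/lib/python3.5/site-packages/sphinx/jinja2glue.py | _slice_index
-- ===== SOURCE A (Python) =====
-- def _slice_index(values, slices):
--     seq = list(values)
--     length = 0
--     for value in values:
--         length += 1 + len(value[1][1])  # count includes subitems
--     items_per_slice = length // slices
--     offset = 0
--     for slice_number in range(slices):
--         count = 0
--         start = offset
--         if slices == slice_number + 1:  # last column
--             offset = len(seq)
--         else:
--             for value in values[offset:]:
--                 count += 1 + len(value[1][1])
--                 offset += 1
--                 if count >= items_per_slice:
--                     break
--         yield seq[start:offset]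
-- ===== SOURCE B (Python) =====
-- def _slice_index(values, slices):
--     # Precompute prefix sums of item weights, then find each cut point by
--     # binary search on the prefix-sum array instead of scanning the tail.
--     seq = list(values)
--     prefix = [0]
--     for v in seq:
--         prefix.append(prefix[-1] + 1 + len(v[1][1]))
--     if slices < 1:
--         return
--     items_per_slice = prefix[-1] // slices
--     n = len(seq)
--     o = 0
--     for _ in range(slices - 1):
--         target = prefix[o] + items_per_slice
--         lo, hi = min(o + 1, n), n
--         while lo < hi:
--             mid = (lo + hi) // 2
--             if prefix[mid] < target:
--                 lo = mid + 1
--             else: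
--                 hi = mid
--         yield seq[o:lo]
--         o = lo
--     yield seq[o:]
-- ===== Notes on version B (the rewrite author's own statement) =====
-- stated objective: alternative
-- what changed: Replaces A's per-slice linear scan of the remaining tail by a once-computed prefix-sum array of item weights and a hand-written binary search that locates each cut point in the prefix sums.
import Mathlib
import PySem

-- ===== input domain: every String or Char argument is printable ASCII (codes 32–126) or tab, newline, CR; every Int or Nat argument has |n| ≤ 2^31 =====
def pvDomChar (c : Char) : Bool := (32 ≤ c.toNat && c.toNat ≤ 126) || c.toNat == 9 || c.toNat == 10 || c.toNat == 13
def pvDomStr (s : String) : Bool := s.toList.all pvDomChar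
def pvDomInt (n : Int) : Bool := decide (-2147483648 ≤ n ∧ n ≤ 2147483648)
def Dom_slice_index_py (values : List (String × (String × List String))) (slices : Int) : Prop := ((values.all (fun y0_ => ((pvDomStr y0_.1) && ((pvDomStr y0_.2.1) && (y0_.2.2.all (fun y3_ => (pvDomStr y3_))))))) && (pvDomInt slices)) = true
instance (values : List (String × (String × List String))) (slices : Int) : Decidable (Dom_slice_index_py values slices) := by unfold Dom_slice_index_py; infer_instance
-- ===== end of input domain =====

-- B precomputes a prefix-sum array of the item weights and finds each cut point by binary
-- search in it, instead of A's per-slice linear scan of the remaining tail (objective: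
-- alternative algorithm, similar cost).

-- ===== PORT A =====
-- inner 'for value in values[offset:] … break' loop of A
def pvInnerA (items : List (String × (String × List String))) (count offset ips : Int) : Int :=
  match items with
  | [] => offset
  | v :: rest =>
    let count := count + 1 + (v.2.2.length : Int)
    let offset := offset + 1
    if count ≥ ips then offset else pvInnerA rest count offset ips

def slice_index_py (values : List (String × (String × List String))) (slices : Int) : List (List (String × (String × List String))) :=
  let seq := values
  let length := values.foldl (fun acc v => acc + 1 + (v.2.2.length : Int)) 0
  let ips := PySem.Int.floordiv length slices
  let r := (PySem.List.pyRange 0 slices 1).foldl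
    (fun (st : Int × List (List (String × (String × List String)))) n =>
      let start := st.1
      let offset := if slices == n + 1 then (seq.length : Int)
                    else pvInnerA (PySem.List.slice values (some st.1) none) 0 st.1 ips
      (offset, st.2 ++ [PySem.List.slice seq (some start) (some offset)]))
    ((0 : Int), [])
  r.2

-- ===== PORT B =====
-- the 'while lo < hi' binary-search loop of B; prefix indexing ported with getD
-- (exact here: every index handed to it is < prefix.length)
def pvBisect (pre : List Int) (target : Int) (lo hi : Nat) : Nat :=
  if lo < hi then
    let mid := (lo + hi) / 2
    if pre.getD mid 0 < target then pvBisect pre target (mid + 1) hi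
    else pvBisect pre target lo mid
  else lo
termination_by hi - lo
decreasing_by all_goals omega

-- seq[o:lo] with 0 ≤ o ≤ lo is exactly (drop o).take (lo-o); prefix[-1] with prefix
-- nonempty is exactly getLastD 0
def slice_index_py_alt (values : List (String × (String × List String))) (slices : Int) : List (List (String × (String × List String))) :=
  let seq := values
  let pref := values.foldl (fun (p : List Int) v => p ++ [p.getLastD 0 + 1 + (v.2.2.length : Int)]) [(0 : Int)]
  if slices < 1 then []
  else
    let ips := PySem.Int.floordiv (pref.getLastD 0) slices
    let n := seq.length
    let r := (PySem.List.pyRange 0 (slices - 1) 1).foldl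
      (fun (st : Nat × List (List (String × (String × List String)))) _ =>
        let o := st.1
        let target := pref.getD o 0 + ips
        let lo := pvBisect pref target (min (o + 1) n) n
        (lo, st.2 ++ [(seq.drop o).take (lo - o)]))
      (0, [])
    r.2 ++ [seq.drop r.1]

-- ===== PRECONDITION & SPEC =====
-- Pre_ excludes only slices = 0, where Python A raises ZeroDivisionError.
def Pre_slice_index_py (values : List (String × (String × List String))) (slices : Int) : Prop := slices ≠ 0
instance (values : List (String × (String × List String))) (slices : Int) : Decidable (Pre_slice_index_py values slices) := by unfold Pre_slice_index_py; infer_instance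
def pvWitness_slice_index_py : (List (String × (String × List String))) × Int := ([], 1)

def Spec_slice_index_py (values : List (String × (String × List String))) (slices : Int) (out : List (List (String × (String × List String)))) : Prop := out = slice_index_py_alt values slices
instance (values : List (String × (String × List String))) (slices : Int) (out : List (List (String × (String × List String)))) : Decidable (Spec_slice_index_py values slices out) := by unfold Spec_slice_index_py; infer_instance

-- ===== CLAIM (what is proved, stated in full; the proofs are below) =====
def Claim_equal_slice_index_py : Prop := ∀ (values : List (String × (String × List String))) (slices : Int), Dom_slice_index_py values slices → Pre_slice_index_py values slices → Spec_slice_index_py values slices (slice_index_py values slices)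

-- ===== LEMMAS AND PROOFS =====

-- item weight
def pvW (v : String × (String × List String)) : Int := 1 + (v.2.2.length : Int)

-- total weight of a list
def pvWsum (xs : List (String × (String × List String))) : Int := (xs.map pvW).sum

-- number of items one greedy slice of A consumes from the suffix
def pvStepN (items : List (String × (String × List String))) (count ips : Int) : Nat :=
  match items with
  | [] => 0
  | v :: rest =>
    let count := count + pvW v
    if count ≥ ips then 1 else 1 + pvStepN rest count ips

-- whether the greedy slice actually reaches ips inside the suffix
def pvReached (items : List (String × (String × List String))) (count ips : Int) : Bool :=
  match items with
  | [] => false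
  | v :: rest =>
    let count := count + pvW v
    if count ≥ ips then true else pvReached rest count ips

-- the m cut boundaries produced from offset o
def pvCutsN (values : List (String × (String × List String))) (ips : Int) (o : Nat) : Nat → List Nat
  | 0 => []
  | m + 1 =>
    let k := pvStepN (values.drop o) 0 ips
    (o + k) :: pvCutsN values ips (o + k) m

-- chunks of seq determined by a cut list (last chunk takes the rest)
def pvChunks (seq : List (String × (String × List String))) (prev : Nat) : List Nat → List (List (String × (String × List String)))
  | [] => [seq.drop prev]
  | c :: cs => (seq.drop prev).take (c - prev) :: pvChunks seq c cs

-- the partial prefix sums following a running total s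
def pvPartial (s : Int) : List (String × (String × List String)) → List Int
  | [] => []
  | v :: t => (s + pvW v) :: pvPartial (s + pvW v) t

theorem pvFoldLen (values : List (String × (String × List String))) :
    values.foldl (fun acc v => acc + 1 + (v.2.2.length : Int)) 0 = pvWsum values := by
  have h : ∀ (xs : List (String × (String × List String))) (i : Int),
      xs.foldl (fun acc v => acc + 1 + (v.2.2.length : Int)) i = i + pvWsum xs := by
    intro xs
    induction xs with
    | nil => intro i; simp [pvWsum]
    | cons x t ih => intro i; simp [List.foldl_cons, ih, pvW, pvWsum]; ring
  simpa using h values 0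

theorem pvInnerA_eq (items : List (String × (String × List String))) (count : Int) (o : Nat) (ips : Int) :
    pvInnerA items count (o : Int) ips = ((o + pvStepN items count ips : Nat) : Int) := by
  induction items generalizing count o with
  | nil => simp [pvInnerA, pvStepN]
  | cons v rest ih =>
    have hc : count + 1 + (v.2.2.length : Int) = count + pvW v := by simp [pvW]; ring
    simp only [pvInnerA, pvStepN, hc]
    by_cases h : count + pvW v ≥ ips
    · simp [h]
    · have := ih (count + pvW v) (o + 1)
      simp only [h, if_false] at *
      rw [show (o : Int) + 1 = ((o + 1 : Nat) : Int) by push_cast; ring, this]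
      push_cast; ring

theorem pvStepN_le (items : List (String × (String × List String))) (count ips : Int) :
    pvStepN items count ips ≤ items.length := by
  induction items generalizing count with
  | nil => simp [pvStepN]
  | cons v rest ih =>
    simp only [pvStepN, List.length_cons]
    split
    · omega
    · have := ih (count + pvW v)
      omega

theorem pvStepN_pos (items : List (String × (String × List String))) (count ips : Int)
    (h : items ≠ []) : 1 ≤ pvStepN items count ips := by
  cases items with
  | nil => exact absurd rfl h
  | cons v rest => simp only [pvStepN]; split <;> omega

theorem pvStepN_of_not_reached (items : List (String × (String × List String))) (count ips : Int)
    (h : pvReached items count ips = false) : pvStepN items count ips = items.length := by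
  induction items generalizing count with
  | nil => simp [pvStepN]
  | cons v rest ih =>
    simp only [pvReached] at h
    simp only [pvStepN, List.length_cons]
    split
    · simp_all
    · rename_i hge
      rw [ih (count + pvW v) (by simpa [hge] using h)]; omega

-- A's outer loop produces the chunks of the canonical cut list
theorem pvA_loop (values : List (String × (String × List String))) (slices ips : Int)
    (m : Nat) (a : Int) (o : Nat) (acc : List (List (String × (String × List String))))
    (ha : 0 ≤ a) (hm : a + (m + 1 : Nat) = slices) :
    (((PySem.List.pyRange a slices 1).foldl
      (fun (st : Int × List (List (String × (String × List String)))) n =>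
        (if slices == n + 1 then ((values.length : Nat) : Int)
         else pvInnerA (PySem.List.slice values (some st.1) none) 0 st.1 ips,
         st.2 ++ [PySem.List.slice values (some st.1)
           (some (if slices == n + 1 then ((values.length : Nat) : Int)
                  else pvInnerA (PySem.List.slice values (some st.1) none) 0 st.1 ips))]))
      ((o : Int), acc)).2)
    = acc ++ pvChunks values o (pvCutsN values ips o m) := by
  induction m generalizing a o acc with
  | zero =>
    have hs : slices = a + 1 := by push_cast at hm; omega
    subst hs
    rw [PySem.List.pyRange_one_singleton]
    simp only [List.foldl_cons, List.foldl_nil, beq_self_eq_true, if_true, pvCutsN, pvChunks]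
    rw [PySem.List.slice_natCast]
    rw [List.take_of_length_le (by simp)]
  | succ m ih =>
    have hlt : a < slices := by push_cast at hm; omega
    rw [PySem.List.pyRange_one_cons hlt]
    have hb : (slices == a + 1) = false := by
      rw [beq_eq_false_iff_ne]; push_cast at hm; omega
    simp only [List.foldl_cons, hb, Bool.false_eq_true, if_false]
    simp only [PySem.List.slice_from_natCast, pvInnerA_eq]
    rw [ih (a + 1) (o + pvStepN (values.drop o) 0 ips)
      (acc ++ [PySem.List.slice values (some (o : Int)) (some ((o + pvStepN (values.drop o) 0 ips : Nat) : Int))])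
      (by omega) (by push_cast at hm ⊢; omega)]
    simp only [pvCutsN, pvChunks, PySem.List.slice_natCast, Nat.add_sub_cancel_left,
      List.append_assoc, List.cons_append, List.nil_append]

-- B's prefix fold builds 0 followed by the partial sums
theorem pvPrefixFold (values : List (String × (String × List String))) :
    values.foldl (fun (p : List Int) v => p ++ [p.getLastD 0 + 1 + (v.2.2.length : Int)]) [(0 : Int)]
      = (0 : Int) :: pvPartial 0 values := by
  have h : ∀ (xs : List (String × (String × List String))) (p : List Int) (s : Int),
      p.getLastD 0 = s →
      xs.foldl (fun (p : List Int) v => p ++ [p.getLastD 0 + 1 + (v.2.2.length : Int)]) p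
        = p ++ pvPartial s xs := by
    intro xs
    induction xs with
    | nil => intro p s _; simp [pvPartial]
    | cons v t ih =>
      intro p s hs
      simp only [List.foldl_cons, pvPartial]
      rw [hs, show s + 1 + (v.2.2.length : Int) = s + pvW v by simp [pvW]; ring]
      rw [ih (p ++ [s + pvW v]) (s + pvW v) (by simp)]
      simp
  simpa using h values [(0 : Int)] 0 rfl

theorem pvPartial_length (s : Int) (xs : List (String × (String × List String))) :
    (pvPartial s xs).length = xs.length := by
  induction xs generalizing s with
  | nil => simp [pvPartial]
  | cons v t ih => simp [pvPartial, ih]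

theorem pvPartial_getLastD (xs : List (String × (String × List String))) (s d : Int) :
    ((s :: pvPartial s xs).getLastD d) = s + pvWsum xs := by
  induction xs generalizing s d with
  | nil => simp [pvPartial, pvWsum]
  | cons v t ih =>
    have h := ih (s + pvW v) s
    simp only [pvPartial, List.getLastD_cons] at h ⊢
    rw [h]
    simp [pvWsum]; ring

theorem pvPre_getD (xs : List (String × (String × List String))) (s : Int) (j : Nat)
    (hj : j ≤ xs.length) :
    ((s :: pvPartial s xs).getD j 0) = s + pvWsum (xs.take j) := by
  induction xs generalizing s j with
  | nil =>
    have : j = 0 := by simpa using hj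
    subst this
    simp [pvWsum]
  | cons v t ih =>
    cases j with
    | zero => simp [pvWsum]
    | succ j' =>
      simp only [pvPartial, List.getD_cons_succ]
      rw [ih (s + pvW v) j' (by simpa using hj)]
      simp [pvWsum]; ring

theorem pvWsum_nonneg (xs : List (String × (String × List String))) : 0 ≤ pvWsum xs := by
  induction xs with
  | nil => simp [pvWsum]
  | cons v t ih =>
    have : (0 : Int) ≤ pvW v := by simp [pvW]; omega
    simp only [pvWsum, List.map_cons, List.sum_cons] at *
    omega

theorem pvWsum_take_add (xs : List (String × (String × List String))) (i j : Nat) :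
    pvWsum (xs.take (i + j)) = pvWsum (xs.take i) + pvWsum ((xs.drop i).take j) := by
  rw [pvWsum, List.take_add, List.map_append, List.sum_append]; rfl

theorem pvPre_mono (values : List (String × (String × List String))) (i j : Nat)
    (hij : i ≤ j) (hj : j ≤ values.length) :
    ((0 : Int) :: pvPartial 0 values).getD i 0 ≤ ((0 : Int) :: pvPartial 0 values).getD j 0 := by
  rw [pvPre_getD values 0 i (by omega), pvPre_getD values 0 j hj]
  obtain ⟨d, rfl⟩ : ∃ d, j = i + d := ⟨j - i, by omega⟩
  rw [pvWsum_take_add]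
  have := pvWsum_nonneg ((values.drop i).take d)
  omega

-- bisect specification: result is the least index in [lo,hi) whose prefix value reaches
-- target, or hi if none
theorem pvBisect_spec (pre : List Int) (target : Int)
    (hm : ∀ i j, i ≤ j → j < pre.length → pre.getD i 0 ≤ pre.getD j 0) :
    ∀ (d lo hi : Nat), hi - lo ≤ d → lo ≤ hi → hi ≤ pre.length →
      lo ≤ pvBisect pre target lo hi ∧ pvBisect pre target lo hi ≤ hi ∧
      (∀ j, lo ≤ j → j < pvBisect pre target lo hi → pre.getD j 0 < target) ∧
      (pvBisect pre target lo hi < hi → target ≤ pre.getD (pvBisect pre target lo hi) 0) := by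
  intro d
  induction d with
  | zero =>
    intro lo hi h1 h2 _
    have he : ¬ lo < hi := by omega
    rw [pvBisect, if_neg he]
    refine ⟨le_refl _, h2, fun j hj hj2 => absurd (Nat.lt_of_le_of_lt hj hj2) (lt_irrefl lo), fun h => absurd h he⟩
  | succ d ih =>
    intro lo hi h1 h2 hlen
    by_cases hlt : lo < hi
    · rw [pvBisect, if_pos hlt]
      simp only []
      by_cases hc : pre.getD ((lo + hi) / 2) 0 < target
      · rw [if_pos hc]
        obtain ⟨s1, s2, s3, s4⟩ := ih ((lo + hi) / 2 + 1) hi (by omega) (by omega) hlen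
        refine ⟨by omega, s2, ?_, s4⟩
        intro j hj hj2
        by_cases hjm : j ≤ (lo + hi) / 2
        · calc pre.getD j 0 ≤ pre.getD ((lo + hi) / 2) 0 := hm j _ hjm (by omega)
            _ < target := hc
        · exact s3 j (by omega) hj2
      · rw [if_neg hc]
        obtain ⟨s1, s2, s3, s4⟩ := ih lo ((lo + hi) / 2) (by omega) (by omega) (by omega)
        refine ⟨s1, by omega, s3, ?_⟩
        intro _
        by_cases hr : pvBisect pre target lo ((lo + hi) / 2) < (lo + hi) / 2
        · exact s4 hr
        · have hre : pvBisect pre target lo ((lo + hi) / 2) = (lo + hi) / 2 := by omega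
          rw [hre]; omega
    · rw [pvBisect, if_neg hlt]
      exact ⟨le_refl _, by omega, fun j hj hj2 => absurd (Nat.lt_of_le_of_lt hj hj2) (by omega), fun h => absurd h hlt⟩

-- A's greedy step characterized by partial sums
theorem pvStepN_char (tail : List (String × (String × List String))) (count ips : Int) :
    (∀ j, 1 ≤ j → j < pvStepN tail count ips → count + pvWsum (tail.take j) < ips) ∧
    (pvReached tail count ips = true → ips ≤ count + pvWsum (tail.take (pvStepN tail count ips))) := by
  induction tail generalizing count with
  | nil =>
    refine ⟨fun j hj hj2 => by simp [pvStepN] at hj2, fun h => by simp [pvReached] at h⟩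
  | cons v rest ih =>
    by_cases hc : count + pvW v ≥ ips
    · refine ⟨fun j hj hj2 => ?_, fun _ => ?_⟩
      · simp [pvStepN, hc] at hj2; omega
      · simp [pvStepN, hc, pvWsum]
    · obtain ⟨i1, i2⟩ := ih (count + pvW v)
      constructor
      · intro j hj hj2
        simp only [pvStepN, if_neg hc] at hj2
        cases j with
        | zero => omega
        | succ j' =>
          cases j' with
          | zero => simpa [pvWsum] using hc
          | succ j'' =>
            have h1 := i1 (j'' + 1) (by omega) (by omega)
            simp only [List.take_succ_cons, pvWsum, List.map_cons, List.sum_cons] at h1 ⊢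
            omega
      · intro hr
        simp only [pvReached, if_neg hc] at hr
        have h2 := i2 hr
        have hstep : pvStepN (v :: rest) count ips = pvStepN rest (count + pvW v) ips + 1 := by
          simp only [pvStepN, if_neg hc]; omega
        rw [hstep]
        simp only [List.take_succ_cons, pvWsum, List.map_cons, List.sum_cons] at h2 ⊢
        omega

-- the binary search finds exactly A's greedy cut
theorem pvBisect_stepN (values : List (String × (String × List String))) (ips : Int)
    (o : Nat) (ho : o ≤ values.length) :
    pvBisect ((0 : Int) :: pvPartial 0 values)
        (((0 : Int) :: pvPartial 0 values).getD o 0 + ips)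
        (min (o + 1) values.length) values.length
      = o + pvStepN (values.drop o) 0 ips := by
  have hlen : ((0 : Int) :: pvPartial 0 values).length = values.length + 1 := by
    simp [pvPartial_length]
  by_cases hon : o = values.length
  · subst hon
    have hmin : min (values.length + 1) values.length = values.length := by omega
    rw [hmin, pvBisect, if_neg (lt_irrefl values.length), List.drop_length]
    simp [pvStepN]
  · have holt : o < values.length := by omega
    have hmin : min (o + 1) values.length = o + 1 := by omega
    rw [hmin]
    have htlen : (values.drop o).length = values.length - o := by simp
    have hk1 : 1 ≤ pvStepN (values.drop o) 0 ips :=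
      pvStepN_pos _ 0 ips (by intro hnil; rw [hnil] at htlen; simp at htlen; omega)
    have hk2 : pvStepN (values.drop o) 0 ips ≤ values.length - o :=
      htlen ▸ pvStepN_le (values.drop o) 0 ips
    have hgd : ∀ j, o + j ≤ values.length →
        ((0 : Int) :: pvPartial 0 values).getD (o + j) 0
          = ((0 : Int) :: pvPartial 0 values).getD o 0 + pvWsum ((values.drop o).take j) := by
      intro j hj
      rw [pvPre_getD values 0 (o + j) hj, pvPre_getD values 0 o (by omega), pvWsum_take_add]
      ring
    obtain ⟨s1, s2, s3, s4⟩ := pvBisect_spec ((0 : Int) :: pvPartial 0 values)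
      (((0 : Int) :: pvPartial 0 values).getD o 0 + ips)
      (fun i j hij hj => pvPre_mono values i j hij (by omega))
      (values.length - o) (o + 1) values.length (by omega) (by omega) (by omega)
    obtain ⟨c1, c2⟩ := pvStepN_char (values.drop o) 0 ips
    rcases lt_trichotomy
        (pvBisect ((0 : Int) :: pvPartial 0 values)
          (((0 : Int) :: pvPartial 0 values).getD o 0 + ips) (o + 1) values.length)
        (o + pvStepN (values.drop o) 0 ips) with hlt' | heq | hgt'
    · exfalso
      have hrn := s4 (by omega)
      have hc1 := c1 (pvBisect ((0 : Int) :: pvPartial 0 values)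
          (((0 : Int) :: pvPartial 0 values).getD o 0 + ips) (o + 1) values.length - o)
        (by omega) (by omega)
      rw [show pvBisect ((0 : Int) :: pvPartial 0 values)
            (((0 : Int) :: pvPartial 0 values).getD o 0 + ips) (o + 1) values.length
          = o + (pvBisect ((0 : Int) :: pvPartial 0 values)
            (((0 : Int) :: pvPartial 0 values).getD o 0 + ips) (o + 1) values.length - o)
          from by omega, hgd _ (by omega)] at hrn
      omega
    · exact heq
    · exfalso
      by_cases hreach : pvReached (values.drop o) 0 ips = true
      · have h2 := c2 hreach
        have h3 := s3 (o + pvStepN (values.drop o) 0 ips) (by omega) hgt'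
        rw [hgd _ (by omega)] at h3
        omega
      · have hkeq : pvStepN (values.drop o) 0 ips = (values.drop o).length :=
          pvStepN_of_not_reached _ 0 ips (by simpa using hreach)
        omega

-- B's outer loop produces the chunks of the same canonical cut list
theorem pvB_loop (values : List (String × (String × List String))) (slices ips : Int)
    (m : Nat) (a : Int) (o : Nat) (acc : List (List (String × (String × List String))))
    (hm : a + (m : Nat) = slices - 1) (ho : o ≤ values.length) :
    (let r := (PySem.List.pyRange a (slices - 1) 1).foldl
        (fun (st : Nat × List (List (String × (String × List String)))) _ =>
          (pvBisect ((0 : Int) :: pvPartial 0 values)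
             (((0 : Int) :: pvPartial 0 values).getD st.1 0 + ips)
             (min (st.1 + 1) values.length) values.length,
           st.2 ++ [(values.drop st.1).take
             (pvBisect ((0 : Int) :: pvPartial 0 values)
               (((0 : Int) :: pvPartial 0 values).getD st.1 0 + ips)
               (min (st.1 + 1) values.length) values.length - st.1)]))
        (o, acc)
     r.2 ++ [values.drop r.1])
    = acc ++ pvChunks values o (pvCutsN values ips o m) := by
  induction m generalizing a o acc with
  | zero =>
    rw [PySem.List.pyRange_one_eq_nil (by push_cast at hm; omega)]
    simp [pvCutsN, pvChunks]
  | succ m ih =>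
    have hlt : a < slices - 1 := by push_cast at hm; omega
    rw [PySem.List.pyRange_one_cons hlt]
    simp only [List.foldl_cons]
    rw [pvBisect_stepN values ips o ho]
    set k := pvStepN (values.drop o) 0 ips with hk
    have hk2 : k ≤ values.length - o := by
      have := pvStepN_le (values.drop o) 0 ips
      simp only [List.length_drop] at this
      omega
    have := ih (a + 1) (o + k) (acc ++ [(values.drop o).take (o + k - o)])
      (by push_cast at hm ⊢; omega) (by omega)
    simp only at this ⊢
    rw [this]
    simp only [pvCutsN, ← hk, pvChunks, Nat.add_sub_cancel_left, List.append_assoc,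
      List.cons_append, List.nil_append]

-- ===== VERDICT (by name: the statement is the Claim_ definition above) =====
theorem slice_index_py_spec : Claim_equal_slice_index_py := by
  intro values slices _ hpre
  unfold Spec_slice_index_py slice_index_py slice_index_py_alt
  by_cases hlt : slices < 1
  · have h0 : slices ≤ 0 := by omega
    rw [PySem.List.pyRange_one_eq_nil h0]
    simp [hlt]
  · have h1 : 1 ≤ slices := by omega
    obtain ⟨m, hm⟩ : ∃ m : Nat, slices = (m : Int) + 1 :=
      ⟨(slices - 1).toNat, by omega⟩
    simp only [if_neg hlt]
    rw [pvPrefixFold values, pvPartial_getLastD values 0 0]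
    rw [show (0 : Int) + pvWsum values = pvWsum values by ring]
    rw [show values.foldl (fun acc v => acc + 1 + (v.2.2.length : Int)) 0 = pvWsum values from pvFoldLen values]
    set ips := PySem.Int.floordiv (pvWsum values) slices with hips
    have hA := pvA_loop values slices ips m 0 0 [] (by omega) (by omega)
    simp only [Nat.cast_zero, List.nil_append] at hA
    rw [hA]
    have hB := pvB_loop values slices ips m 0 0 [] (by omega) (by omega)
    simp only [List.nil_append] at hB
    rw [hB]
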